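-- pv_equiv track=rewrite | github.com/bivex/EnvEditor | src/infrastructure/adapters/system_process_adapter.py | _sanitize_process_name
-- ===== SOURCE A (Python) =====
-- def _sanitize_process_name(name: str) -> str:
--     """Sanitize a process name to make it valid for ProcessName."""
--     if not name:
--         return 'unknown'
--
--     # Remove or replace invalid characters
--     invalid_chars = '/\\:*?"<>|'
--     sanitized = name
--
--     # Replace invalid characters with underscores
--     for char in invalid_chars:
--         sanitized = sanitized.replace(char, '_')
--
--     # Ensure it's not empty after sanitization
--     sanitized = sanitized.strip()
--     if not sanitized:
--         return 'unknown'
--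
--     # Truncate if too long (ProcessName.MAX_LENGTH is 255)
--     if len(sanitized) > 255:
--         sanitized = sanitized[:252] + '...'
--
--     return sanitized
-- ===== SOURCE B (Python) =====
-- _INVALID = set('/\\:*?"<>|')
--
--
-- def _sanitize_process_name(name: str) -> str:
--     """Sanitize a process name to make it valid for ProcessName."""
--     if not name:
--         return 'unknown'
--
--     # Single pass over the name: replace every invalid character with '_'
--     sanitized = ''.join('_' if c in _INVALID else c for c in name).strip()
--     if not sanitized:
--         return 'unknown'
--
--     if len(sanitized) > 255:
--         return sanitized[:252] + '...'
--     return sanitized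
-- ===== Notes on version B (the rewrite author's own statement) =====
-- stated objective: idiomatic
-- what changed: Replaces the loop of nine full-string str.replace passes by one single pass over the name building the result with a set-membership test per character.
import Mathlib
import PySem

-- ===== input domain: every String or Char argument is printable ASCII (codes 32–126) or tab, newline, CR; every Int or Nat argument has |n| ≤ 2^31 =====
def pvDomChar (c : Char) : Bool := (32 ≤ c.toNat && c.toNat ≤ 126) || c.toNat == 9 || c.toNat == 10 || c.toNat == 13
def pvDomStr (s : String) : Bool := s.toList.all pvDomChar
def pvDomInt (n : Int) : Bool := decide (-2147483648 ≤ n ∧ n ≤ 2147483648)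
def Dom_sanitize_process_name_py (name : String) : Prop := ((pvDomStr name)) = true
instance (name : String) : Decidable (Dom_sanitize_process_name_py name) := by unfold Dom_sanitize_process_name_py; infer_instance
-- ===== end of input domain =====

-- B replaces A's nine sequential str.replace passes by one single pass over the name
-- with a set-membership test per character (idiomatic; same result proved equal).


-- ===== PORT A =====
def sanitize_process_name_py (name : String) : String :=
  if name = "" then "unknown"
  else
    let invalid_chars : String := "/\\:*?\"<>|"
    -- for char in invalid_chars: sanitized = sanitized.replace(char, '_')
    let sanitized := invalid_chars.toList.foldl
      (fun s c => PySem.Str.replace s (String.ofList [c]) "_") name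
    let sanitized := PySem.Str.strip sanitized
    if sanitized = "" then "unknown"
    else if PySem.Str.len sanitized > 255 then PySem.Str.slice sanitized none (some 252) ++ "..."
    else sanitized

-- ===== PORT B =====
def pvInvalidSet : PySem.Set Char := PySem.Set.ofList "/\\:*?\"<>|".toList

def sanitize_process_name_py_alt (name : String) : String :=
  if name = "" then "unknown"
  else
    -- ''.join('_' if c in _INVALID else c for c in name).strip()
    let sanitized := PySem.Str.strip
      (String.ofList (name.toList.map (fun c => if pvInvalidSet.contains c then '_' else c)))
    if sanitized = "" then "unknown"
    else if PySem.Str.len sanitized > 255 then PySem.Str.slice sanitized none (some 252) ++ "..."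
    else sanitized

-- ===== PRECONDITION & SPEC =====
def Spec_sanitize_process_name_py (name : String) (out : String) : Prop := out = sanitize_process_name_py_alt name
instance (name : String) (out : String) : Decidable (Spec_sanitize_process_name_py name out) := by unfold Spec_sanitize_process_name_py; infer_instance

-- ===== CLAIM (what is proved, stated in full; the proofs are below) =====
def Claim_equal_sanitize_process_name_py : Prop := ∀ (name : String), Dom_sanitize_process_name_py name → Spec_sanitize_process_name_py name (sanitize_process_name_py name)

-- ===== LEMMAS AND PROOFS =====

-- single-char replace.go is a map, given enough fuel
theorem replace_go_single (c d : Char) :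
    ∀ (fuel : Nat) (l acc : List Char), l.length ≤ fuel →
      PySem.Chars.replace.go [c] [d] fuel l acc
        = acc.reverse ++ l.map (fun x => if x = c then d else x) := by
  intro fuel
  induction fuel with
  | zero =>
    intro l acc h
    have : l = [] := List.eq_nil_of_length_eq_zero (Nat.le_zero.mp h)
    subst this
    simp [PySem.Chars.replace.go]
  | succ n ih =>
    intro l acc h
    cases l with
    | nil => simp [PySem.Chars.replace.go]
    | cons x t =>
      rw [PySem.Chars.replace.go.eq_def]
      simp only [List.isPrefixOf, List.length_cons] at *
      by_cases hx : x = c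
      · subst hx
        rw [if_pos (by simp)]
        have hdrop : List.drop (([] : List Char).length + 1) (x :: t) = t := by simp
        rw [hdrop, ih _ _ (by omega)]
        simp
      · have hx' : c ≠ x := fun hc => hx hc.symm
        rw [if_neg (by simp [hx']), ih _ _ (by omega)]
        simp [hx]

theorem replace_single (c d : Char) (s : List Char) :
    PySem.Chars.replace s [c] [d] = s.map (fun x => if x = c then d else x) := by
  simp [PySem.Chars.replace, replace_go_single c d s.length s [] le_rfl]

-- the pointwise fold is a membership test
theorem foldl_char_mem (cs : List Char) (x : Char) :
    cs.foldl (fun y c => if y = c then '_' else y) x = if x ∈ cs then '_' else x := by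
  induction cs generalizing x with
  | nil => simp
  | cons c cs ih =>
    simp only [List.foldl_cons, List.mem_cons]
    by_cases hx : x = c
    · subst hx
      simp [ih]
    · simp [hx, ih]

theorem foldl_replace_key (cs : List Char) (s : String) :
    cs.foldl (fun s c => PySem.Str.replace s (String.ofList [c]) "_") s
      = String.ofList (s.toList.map (fun x => cs.foldl (fun y c => if y = c then '_' else y) x)) := by
  induction cs generalizing s with
  | nil => simp
  | cons c cs ih =>
    simp only [List.foldl_cons, ih]
    congr 1
    have hpt : (PySem.Str.replace s (String.ofList [c]) "_").toList
        = s.toList.map (fun x => if x = c then '_' else x) := by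
      rw [PySem.Str.toList_replace]
      have h1 : (String.ofList [c]).toList = [c] := by simp
      have h2 : ("_" : String).toList = ['_'] := rfl
      rw [h1, h2]
      exact replace_single c '_' s.toList
    simp [hpt, List.map_map, Function.comp]

set_option maxHeartbeats 1000000 in
theorem sanitized_eq (name : String) :
    ("/\\:*?\"<>|".toList.foldl (fun s c => PySem.Str.replace s (String.ofList [c]) "_") name)
      = String.ofList (name.toList.map (fun c => if pvInvalidSet.contains c then '_' else c)) := by
  refine (foldl_replace_key _ name).trans (congrArg String.ofList ?_)
  apply List.map_congr_left
  intro x _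
  rw [foldl_char_mem]
  have : pvInvalidSet.contains x = true ↔ x ∈ "/\\:*?\"<>|".toList := by
    rw [PySem.Set.contains_iff, pvInvalidSet, PySem.Set.mem_ofList]
  by_cases hm : x ∈ "/\\:*?\"<>|".toList
  · rw [if_pos hm, if_pos (this.mpr hm)]
  · rw [if_neg hm, if_neg (fun h => hm (this.mp h))]

-- ===== VERDICT (by name: the statement is the Claim_ definition above) =====
theorem sanitize_process_name_py_spec : Claim_equal_sanitize_process_name_py := by
  intro name _
  unfold Spec_sanitize_process_name_py sanitize_process_name_py sanitize_process_name_py_alt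
  by_cases h : name = ""
  · simp [h]
  · simp only [if_neg h]
    rw [sanitized_eq]
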